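-- pv_equiv track=rewrite | github.com/mbkizil/LAMP | src/scripts/generate_camera_trajectory.py | determine_pattern
-- ===== SOURCE A (Python) =====
-- from collections import Counter
--
-- def determine_pattern(segments):
--     """
--     Determines the structural pattern (e.g., AABB, ABCD) from the given 4 segments.
--     Returns a pattern string where identical segments are represented by the same letter.
--     """
--     if not segments or len(segments) != 4:
--         return "ABCD"
--     full_segments = [tuple(seg) for seg in segments]
--     counts = Counter(full_segments)
--
--     if len(counts) == 1:
--         return "AAAA"
--     elif len(counts) == 4:
--         return "ABCD"
--     elif len(counts) == 3:
--         if full_segments[0] == full_segments[1]: return "AABC"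
--         if full_segments[1] == full_segments[2]: return "ABBC"
--         if full_segments[2] == full_segments[3]: return "ABCC"
--         else: return "ABCD"
--     elif len(counts) == 2:
--         if full_segments[0] == full_segments[1] and full_segments[2] == full_segments[3]:
--             return "AABB"
--         elif full_segments[0] == full_segments[1] == full_segments[2]:
--             return "AAAB"
--         elif full_segments[1] == full_segments[2] == full_segments[3]:
--             return "ABBB"
--         else:
--             return "ABCD"
--     return "ABCD"
-- ===== SOURCE B (Python) =====
-- def determine_pattern(segments):
--     """First-occurrence relabelling (A,B,C,...) plus a contiguity check,
--     instead of A's Counter-size case analysis."""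
--     if not segments or len(segments) != 4:
--         return "ABCD"
--     label = {}
--     pattern = ""
--     for seg in segments:
--         key = tuple(seg)
--         c = label.get(key)
--         if c is None:
--             c = chr(ord('A') + len(label))
--             label[key] = c
--         pattern += c
--     if all(pattern[i] <= pattern[i + 1] for i in range(len(pattern) - 1)):
--         return pattern
--     return "ABCD"
-- ===== Notes on version B (the rewrite author's own statement) =====
-- stated objective: alternative
-- what changed: Replaced A's Counter-size case analysis with eight hard-coded answers by a first-occurrence relabelling loop that builds the pattern string directly and validates it with a single non-decreasing check.
import Mathlib
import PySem

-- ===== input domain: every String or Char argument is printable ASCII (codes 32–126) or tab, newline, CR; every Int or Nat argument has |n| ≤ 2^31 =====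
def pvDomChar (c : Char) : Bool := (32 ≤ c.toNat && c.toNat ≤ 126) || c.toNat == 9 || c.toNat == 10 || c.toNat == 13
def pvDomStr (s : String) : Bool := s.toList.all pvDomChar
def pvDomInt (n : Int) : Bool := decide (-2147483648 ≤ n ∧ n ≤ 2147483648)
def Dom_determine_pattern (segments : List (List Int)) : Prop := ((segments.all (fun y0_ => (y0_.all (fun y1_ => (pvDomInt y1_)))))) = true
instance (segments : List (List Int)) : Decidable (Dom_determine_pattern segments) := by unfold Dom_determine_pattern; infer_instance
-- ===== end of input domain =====

-- ===== PORT A =====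
-- A classifies the 4 segments by the number of distinct segments (Counter size)
-- and pairwise equality checks; tuple(seg) is the identity on List Int here.
-- Indexing full_segments[i] (i < 4) is in range under the length guard; ported via pyGetD.
def determine_pattern (segments : List (List Int)) : String :=
  if segments = [] ∨ segments.length ≠ 4 then "ABCD"
  else
    let full_segments := segments
    let counts := PySem.Dict.counter full_segments
    if counts.size = 1 then "AAAA"
    else if counts.size = 4 then "ABCD"
    else if counts.size = 3 then
      if PySem.List.pyGetD full_segments 0 [] = PySem.List.pyGetD full_segments 1 [] then "AABC"
      else if PySem.List.pyGetD full_segments 1 [] = PySem.List.pyGetD full_segments 2 [] then "ABBC"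
      else if PySem.List.pyGetD full_segments 2 [] = PySem.List.pyGetD full_segments 3 [] then "ABCC"
      else "ABCD"
    else if counts.size = 2 then
      if PySem.List.pyGetD full_segments 0 [] = PySem.List.pyGetD full_segments 1 []
         ∧ PySem.List.pyGetD full_segments 2 [] = PySem.List.pyGetD full_segments 3 [] then "AABB"
      else if PySem.List.pyGetD full_segments 0 [] = PySem.List.pyGetD full_segments 1 []
         ∧ PySem.List.pyGetD full_segments 1 [] = PySem.List.pyGetD full_segments 2 [] then "AAAB"
      else if PySem.List.pyGetD full_segments 1 [] = PySem.List.pyGetD full_segments 2 []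
         ∧ PySem.List.pyGetD full_segments 2 [] = PySem.List.pyGetD full_segments 3 [] then "ABBB"
      else "ABCD"
    else "ABCD"

-- ===== PORT B =====
-- B assigns letters by first occurrence (dict key -> letter), then keeps the
-- pattern only if it is non-decreasing (equal segments contiguous); else "ABCD".
-- The Python for-loop over segments carrying (label, pattern) is ported as the
-- structural recursion altLoop on the same state.
def altLoop : List (List Int) → PySem.Dict (List Int) Char → List Char → List Char
  | [], _, pattern => pattern
  | seg :: rest, label, pattern =>
    match label.get? seg with
    | some c => altLoop rest label (pattern ++ [c])
    | none =>
        let c := Char.ofNat (65 + label.size)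
        altLoop rest (label.insert seg c) (pattern ++ [c])

def determine_pattern_alt (segments : List (List Int)) : String :=
  if segments = [] ∨ segments.length ≠ 4 then "ABCD"
  else
    let pattern := altLoop segments PySem.Dict.empty []
    if List.IsChain (· ≤ ·) pattern then String.ofList pattern else "ABCD"

-- ===== PRECONDITION & SPEC =====
def Spec_determine_pattern (segments : List (List Int)) (out : String) : Prop := out = determine_pattern_alt segments
instance (segments : List (List Int)) (out : String) : Decidable (Spec_determine_pattern segments out) := by unfold Spec_determine_pattern; infer_instance

-- ===== CLAIM (what is proved, stated in full; the proofs are below) =====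
def Claim_equal_determine_pattern : Prop := ∀ (segments : List (List Int)), Dom_determine_pattern segments → Spec_determine_pattern segments (determine_pattern segments)

-- ===== LEMMAS AND PROOFS =====

set_option maxHeartbeats 4000000 in
lemma quad_eq (a b c d : List Int) :
    determine_pattern [a, b, c, d] = determine_pattern_alt [a, b, c, d] := by
  by_cases h1 : a = b <;> by_cases h2 : a = c <;> by_cases h3 : a = d <;>
    by_cases h4 : b = c <;> by_cases h5 : b = d <;> by_cases h6 : c = d <;>
    (try have h1' : b ≠ a := fun h => h1 h.symm) <;>
    (try have h2' : c ≠ a := fun h => h2 h.symm) <;>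
    (try have h3' : d ≠ a := fun h => h3 h.symm) <;>
    (try have h4' : c ≠ b := fun h => h4 h.symm) <;>
    (try have h5' : d ≠ b := fun h => h5 h.symm) <;>
    (try have h6' : d ≠ c := fun h => h6 h.symm) <;>
    simp_all [determine_pattern, determine_pattern_alt, altLoop, PySem.Dict.counter,
      PySem.Dict.modify, PySem.Dict.insert, PySem.Dict.get?, PySem.Dict.empty,
      PySem.Dict.contains, PySem.Dict.size, PySem.List.pyGetD]

-- ===== VERDICT (by name: the statement is the Claim_ definition above) =====
theorem determine_pattern_spec : Claim_equal_determine_pattern := by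
  intro segments _
  unfold Spec_determine_pattern
  rcases segments with _ | ⟨a, _ | ⟨b, _ | ⟨c, _ | ⟨d, _ | ⟨e, t⟩⟩⟩⟩⟩
  · rfl
  · rfl
  · rfl
  · rfl
  · exact quad_eq a b c d
  · simp [determine_pattern, determine_pattern_alt]
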